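-- pv_equiv track=rewrite | github.com/tangjiewei0336/ascii_choir | src/utils/midi_to_choir.py | _merge_consecutive_tuplets
-- ===== SOURCE A (Python) =====
-- def _merge_consecutive_tuplets(tokens: list[str]) -> list[str]:
--     """
--     后处理：合并连续的单音三/五连音、八分、十六分。
--     (1)3 (2)3 (5)3 (1)3 (2)3 (5)3 → (1 2 5 1 2 5)3
--     1_ 2_ 5_ 1_ 2_ 5_ → (1 2 5 1 2 5)_
--     1__ 2__ 5__ → (1 2 5)__
--     """
--     result: list[str] = []
--     i = 0
--     while i < len(tokens):
--         t = tokens[i]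
--         # (x)3 或 (x)5：单音连音（inner 无空格），合并连续同类型
--         if t.startswith("(") and ")" in t:
--             close = t.index(")")
--             inner = t[1:close]
--             suff = t[close + 1 :].lstrip()
--             if suff in ("3", "5") and " " not in inner and len(inner) >= 1:
--                 group = [inner]
--                 j = i + 1
--                 while j < len(tokens):
--                     nxt = tokens[j]
--                     if nxt.startswith("(") and ")" in nxt:
--                         nc = nxt.index(")")
--                         ninner = nxt[1:nc]
--                         nsuff = nxt[nc + 1 :].lstrip()
--                         if nsuff == suff and " " not in ninner and len(ninner) >= 1:
--                             group.append(ninner)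
--                             j += 1
--                         else:
--                             break
--                     else:
--                         break
--                 result.append("(" + " ".join(group) + ")" + suff)
--                 i = j
--                 continue
--
--         # x_ 八分：合并连续单音八分（不含 ~ 开头的连音延续）
--         if (
--             t != "|"
--             and t.endswith("_")
--             and not t.endswith("__")
--             and not t.startswith("~")
--         ):
--             group = [t[:-1]]
--             j = i + 1
--             while j < len(tokens):
--                 nxt = tokens[j]
--                 if (
--                     nxt != "|"
--                     and nxt.endswith("_")
--                     and not nxt.endswith("__")
--                     and not nxt.startswith("~")
--                 ):
--                     group.append(nxt[:-1])
--                     j += 1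
--                 else:
--                     break
--             if len(group) >= 2:
--                 result.append("(" + " ".join(group) + ")_")
--                 i = j
--                 continue
--
--         # x__ 十六分：合并连续单音十六分
--         if (
--             t != "|"
--             and t.endswith("__")
--             and not t.endswith("___")
--             and not t.startswith("~")
--         ):
--             group = [t[:-2]]
--             j = i + 1
--             while j < len(tokens):
--                 nxt = tokens[j]
--                 if (
--                     nxt != "|"
--                     and nxt.endswith("__")
--                     and not nxt.endswith("___")
--                     and not nxt.startswith("~")
--                 ):
--                     group.append(nxt[:-2])
--                     j += 1
--                 else:
--                     break
--             if len(group) >= 2: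
--                 result.append("(" + " ".join(group) + ")__")
--                 i = j
--                 continue
--
--         result.append(t)
--         i += 1
--     return result
-- ===== SOURCE B (Python) =====
-- from itertools import groupby
--
--
-- def _classify(t):
--     """Classify one token: ('t', suffix, inner) for a single-note tuplet,
--     ('e', '', base) for an eighth, ('s', '', base) for a sixteenth,
--     ('n', '', t) otherwise.  Same predicates as the lookahead version."""
--     if t.startswith("(") and ")" in t:
--         close = t.index(")")
--         inner = t[1:close]
--         suff = t[close + 1:].lstrip()
--         if suff in ("3", "5") and " " not in inner and len(inner) >= 1:
--             return ("t", suff, inner)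
--     if t == "|" or t.startswith("~"):
--         return ("n", "", t)
--     if t.endswith("_") and not t.endswith("__"):
--         return ("e", "", t[:-1])
--     if t.endswith("__") and not t.endswith("___"):
--         return ("s", "", t[:-2])
--     return ("n", "", t)
--
--
-- def _merge_consecutive_tuplets(tokens: list[str]) -> list[str]:
--     result: list[str] = []
--     for (cat, suff), grp in groupby(tokens, key=lambda t: _classify(t)[:2]):
--         run = list(grp)
--         if cat == "t":
--             result.append("(" + " ".join(_classify(t)[2] for t in run) + ")" + suff)
--         elif cat == "e" and len(run) >= 2:
--             result.append("(" + " ".join(_classify(t)[2] for t in run) + ")_")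
--         elif cat == "s" and len(run) >= 2:
--             result.append("(" + " ".join(_classify(t)[2] for t in run) + ")__")
--         else:
--             result.extend(run)
--     return result
-- ===== Notes on version B (the rewrite author's own statement) =====
-- stated objective: simpler
-- what changed: Replaces the index-driven while loop with three inline lookahead sub-loops by a classify-then-group pass: each token gets a classification key once and itertools.groupby merges consecutive equal-key runs, with one emit rule per category.
import Mathlib
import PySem

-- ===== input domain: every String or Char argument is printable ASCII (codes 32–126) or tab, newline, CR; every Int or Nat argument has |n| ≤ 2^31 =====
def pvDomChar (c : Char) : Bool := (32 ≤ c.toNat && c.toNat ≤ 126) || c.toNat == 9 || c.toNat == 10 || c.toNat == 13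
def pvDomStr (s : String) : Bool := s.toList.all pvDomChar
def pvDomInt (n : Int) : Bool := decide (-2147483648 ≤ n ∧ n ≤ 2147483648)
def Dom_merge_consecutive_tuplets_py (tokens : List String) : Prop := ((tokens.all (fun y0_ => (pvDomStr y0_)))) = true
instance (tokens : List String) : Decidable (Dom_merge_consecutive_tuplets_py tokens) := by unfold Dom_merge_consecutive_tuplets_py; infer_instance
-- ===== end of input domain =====

-- B merges the same runs but by classifying each token once and grouping consecutive
-- equal-key tokens (groupby), instead of A's three inline lookahead sub-loops: 'simpler'.

-- ===== PORT A =====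
-- A works on strings; both ports compute on List Char (PySem.Chars is the List Char side
-- of PySem.Str, exact for Python's str operations) and convert at the boundary.
-- The token-level expressions of A's branch guards, named once (both Pythons contain
-- these same expressions): t[1:close], t[close+1:].lstrip(), and the three guards.

def pvSuffixOf (cs : List Char) : List Char :=
  PySem.Chars.lstrip (PySem.List.slice cs (some (PySem.Chars.find cs [')'] + 1)) none)

def pvInnerOf (cs : List Char) : List Char :=
  PySem.List.slice cs (some 1) (some (PySem.Chars.find cs [')']))

-- t.startswith("(") and ")" in t and suff in ("3","5") and " " not in inner and len(inner)>=1
def pvTupGuard (cs : List Char) : Bool :=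
  PySem.Chars.startswith cs ['('] && PySem.Chars.isIn [')'] cs &&
    ((pvSuffixOf cs == ['3'] || pvSuffixOf cs == ['5']) && !PySem.Chars.isIn [' '] (pvInnerOf cs)
      && decide (1 ≤ (pvInnerOf cs).length))

-- t != "|" and t.endswith("_") and not t.endswith("__") and not t.startswith("~")
def pvEGuard (cs : List Char) : Bool :=
  !(cs == ['|']) && PySem.Chars.endswith cs ['_'] && !PySem.Chars.endswith cs ['_', '_']
    && !PySem.Chars.startswith cs ['~']

-- t != "|" and t.endswith("__") and not t.endswith("___") and not t.startswith("~")
def pvSGuard (cs : List Char) : Bool :=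
  !(cs == ['|']) && PySem.Chars.endswith cs ['_', '_'] && !PySem.Chars.endswith cs ['_', '_', '_']
    && !PySem.Chars.startswith cs ['~']

-- inner while loop of A's tuplet branch: collect inners of consecutive same-suffix
-- single-note tuplets, return (collected inners, remaining tokens)
def pvTupRun (suff : List Char) : List (List Char) → List (List Char) × List (List Char)
  | [] => ([], [])
  | nxt :: rest =>
    if PySem.Chars.startswith nxt ['('] && PySem.Chars.isIn [')'] nxt
        && (pvSuffixOf nxt == suff && !PySem.Chars.isIn [' '] (pvInnerOf nxt)
            && decide (1 ≤ (pvInnerOf nxt).length)) then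
      let gr := pvTupRun suff rest
      (pvInnerOf nxt :: gr.1, gr.2)
    else ([], nxt :: rest)

-- inner while loop of A's eighth branch (t[:-1] is slice to -1)
def pvERun : List (List Char) → List (List Char) × List (List Char)
  | [] => ([], [])
  | nxt :: rest =>
    if pvEGuard nxt then
      let gr := pvERun rest
      (PySem.List.slice nxt none (some (-1)) :: gr.1, gr.2)
    else ([], nxt :: rest)

-- inner while loop of A's sixteenth branch (t[:-2] is slice to -2)
def pvSRun : List (List Char) → List (List Char) × List (List Char)
  | [] => ([], [])
  | nxt :: rest =>
    if pvSGuard nxt then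
      let gr := pvSRun rest
      (PySem.List.slice nxt none (some (-2)) :: gr.1, gr.2)
    else ([], nxt :: rest)

theorem pvTupRun_snd_le (suff : List Char) (l : List (List Char)) :
    (pvTupRun suff l).2.length ≤ l.length := by
  induction l with
  | nil => simp [pvTupRun]
  | cons x xs ih =>
    simp only [pvTupRun]
    split
    · simpa using Nat.le_succ_of_le ih
    · simp

theorem pvERun_snd_le (l : List (List Char)) : (pvERun l).2.length ≤ l.length := by
  induction l with
  | nil => simp [pvERun]
  | cons x xs ih =>
    simp only [pvERun]
    split
    · simpa using Nat.le_succ_of_le ih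
    · simp

theorem pvSRun_snd_le (l : List (List Char)) : (pvSRun l).2.length ≤ l.length := by
  induction l with
  | nil => simp [pvSRun]
  | cons x xs ih =>
    simp only [pvSRun]
    split
    · simpa using Nat.le_succ_of_le ih
    · simp

-- the outer while loop of A; a failed >=2 merge falls through exactly as in A
-- (after a failed eighth merge the sixteenth test is false, so A appends t and moves on)
def pvMergeA : List (List Char) → List (List Char)
  | [] => []
  | t :: rest =>
    if pvTupGuard t then
      let gr := pvTupRun (pvSuffixOf t) rest
      (['('] ++ PySem.Chars.join [' '] (pvInnerOf t :: gr.1) ++ [')'] ++ pvSuffixOf t) :: pvMergeA gr.2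
    else if pvEGuard t then
      let gr := pvERun rest
      if 2 ≤ (PySem.List.slice t none (some (-1)) :: gr.1).length then
        (['('] ++ PySem.Chars.join [' '] (PySem.List.slice t none (some (-1)) :: gr.1) ++ [')', '_']) :: pvMergeA gr.2
      else t :: pvMergeA rest
    else if pvSGuard t then
      let gr := pvSRun rest
      if 2 ≤ (PySem.List.slice t none (some (-2)) :: gr.1).length then
        (['('] ++ PySem.Chars.join [' '] (PySem.List.slice t none (some (-2)) :: gr.1) ++ [')', '_', '_']) :: pvMergeA gr.2
      else t :: pvMergeA rest
    else t :: pvMergeA rest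
  termination_by l => l.length
  decreasing_by
  · exact Nat.lt_succ_of_le (pvTupRun_snd_le _ _)
  · exact Nat.lt_succ_of_le (pvERun_snd_le _)
  · exact Nat.lt_succ_of_le rest.length.le_refl
  · exact Nat.lt_succ_of_le (pvSRun_snd_le _)
  · exact Nat.lt_succ_of_le rest.length.le_refl
  · exact Nat.lt_succ_of_le rest.length.le_refl

def merge_consecutive_tuplets_py (tokens : List String) : List String :=
  (pvMergeA (tokens.map String.toList)).map String.ofList

-- ===== PORT B =====
-- classification category of Source B's _classify (first two components of its key)
inductive PvCat : Type
  | tup : List Char → PvCat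
  | eighth : PvCat
  | sixteenth : PvCat
  | none : PvCat
deriving DecidableEq, Repr

-- Source B's _classify: (category&suffix, payload)
def pvClassifyRest (cs : List Char) : PvCat × List Char :=
  if cs == ['|'] || PySem.Chars.startswith cs ['~'] then (PvCat.none, cs)
  else if PySem.Chars.endswith cs ['_'] && !PySem.Chars.endswith cs ['_', '_'] then
    (PvCat.eighth, PySem.List.slice cs none (some (-1)))
  else if PySem.Chars.endswith cs ['_', '_'] && !PySem.Chars.endswith cs ['_', '_', '_'] then
    (PvCat.sixteenth, PySem.List.slice cs none (some (-2)))
  else (PvCat.none, cs)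

def pvClassify (cs : List Char) : PvCat × List Char :=
  if PySem.Chars.startswith cs ['('] && PySem.Chars.isIn [')'] cs then
    if (pvSuffixOf cs == ['3'] || pvSuffixOf cs == ['5']) && !PySem.Chars.isIn [' '] (pvInnerOf cs)
        && decide (1 ≤ (pvInnerOf cs).length) then
      (PvCat.tup (pvSuffixOf cs), pvInnerOf cs)
    else pvClassifyRest cs
  else pvClassifyRest cs

-- one emit rule per category (the run's originals for a singleton eighth/sixteenth or 'n')
def pvEmit (k : PvCat) (run : List (List Char)) : List (List Char) :=
  match k with
  | PvCat.tup suff => [['('] ++ PySem.Chars.join [' '] (run.map (fun t => (pvClassify t).2)) ++ [')'] ++ suff]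
  | PvCat.eighth =>
      if 2 ≤ run.length then
        [['('] ++ PySem.Chars.join [' '] (run.map (fun t => (pvClassify t).2)) ++ [')', '_']]
      else run
  | PvCat.sixteenth =>
      if 2 ≤ run.length then
        [['('] ++ PySem.Chars.join [' '] (run.map (fun t => (pvClassify t).2)) ++ [')', '_', '_']]
      else run
  | PvCat.none => run

-- groupby over consecutive equal keys
def pvMergeB : List (List Char) → List (List Char)
  | [] => []
  | t :: rest =>
    let k := (pvClassify t).1
    pvEmit k (t :: rest.takeWhile (fun x => (pvClassify x).1 == k))
      ++ pvMergeB (rest.dropWhile (fun x => (pvClassify x).1 == k))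
  termination_by l => l.length
  decreasing_by
    exact Nat.lt_succ_of_le (List.length_dropWhile_le _ _)

def merge_consecutive_tuplets_py_alt (tokens : List String) : List String :=
  (pvMergeB (tokens.map String.toList)).map String.ofList

-- ===== PRECONDITION & SPEC =====
def Spec_merge_consecutive_tuplets_py (tokens : List String) (out : List String) : Prop := out = merge_consecutive_tuplets_py_alt tokens
instance (tokens : List String) (out : List String) : Decidable (Spec_merge_consecutive_tuplets_py tokens out) := by unfold Spec_merge_consecutive_tuplets_py; infer_instance

-- ===== CLAIM (what is proved, stated in full; the proofs are below) =====
def Claim_equal_merge_consecutive_tuplets_py : Prop := ∀ (tokens : List String), Dom_merge_consecutive_tuplets_py tokens → Spec_merge_consecutive_tuplets_py tokens (merge_consecutive_tuplets_py tokens)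

-- ===== LEMMAS AND PROOFS =====

theorem pvClassify_eq_ite (cs : List Char) :
    pvClassify cs = if pvTupGuard cs then (PvCat.tup (pvSuffixOf cs), pvInnerOf cs)
      else pvClassifyRest cs := by
  unfold pvClassify pvTupGuard
  by_cases h1 : (PySem.Chars.startswith cs ['('] && PySem.Chars.isIn [')'] cs) = true
  · simp only [h1, if_pos, Bool.true_and]
  · simp only [Bool.not_eq_true] at h1
    simp [h1]

theorem pvSuffixOf_suffix (cs : List Char) : pvSuffixOf cs <:+ cs := by
  unfold pvSuffixOf
  rw [PySem.List.slice_from cs (by have := PySem.Chars.neg_one_le_find cs [')']; omega)]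
  exact (List.dropWhile_suffix _).trans (List.drop_suffix _ _)

theorem pvLast_of_suffix_one (cs : List Char) (a : Char) (h : [a] <:+ cs) : cs.getLast? = some a := by
  obtain ⟨p, rfl⟩ := h; simp

theorem pvLast_of_suffix_two (cs : List Char) (a b : Char) (h : [a, b] <:+ cs) : cs.getLast? = some b := by
  obtain ⟨p, rfl⟩ := h
  rw [show p ++ [a, b] = (p ++ [a]) ++ [b] by simp]; simp

theorem pvTupGuard_suffix35 (cs : List Char) (h : pvTupGuard cs = true) :
    pvSuffixOf cs = ['3'] ∨ pvSuffixOf cs = ['5'] := by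
  unfold pvTupGuard at h
  simp only [Bool.and_eq_true, Bool.or_eq_true, beq_iff_eq] at h
  exact h.2.1.1

-- a single-note tuplet token ends in '3'/'5', hence in neither '_' nor '__'
theorem pvTupGuard_not_underscore (cs : List Char) (h : pvTupGuard cs = true) :
    PySem.Chars.endswith cs ['_'] = false ∧ PySem.Chars.endswith cs ['_', '_'] = false := by
  have hsuff := pvTupGuard_suffix35 cs h
  have hs := pvSuffixOf_suffix cs
  constructor
  · cases hb : PySem.Chars.endswith cs ['_'] with
    | false => rfl
    | true =>
      exfalso
      have h2 := pvLast_of_suffix_one cs '_' ((PySem.Chars.endswith_iff _ _).mp hb)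
      rcases hsuff with h' | h' <;> rw [h'] at hs <;>
        · have := pvLast_of_suffix_one cs _ hs
          rw [h2] at this; exact absurd (Option.some.inj this) (by decide)
  · cases hb : PySem.Chars.endswith cs ['_', '_'] with
    | false => rfl
    | true =>
      exfalso
      have h2 := pvLast_of_suffix_two cs '_' '_' ((PySem.Chars.endswith_iff _ _).mp hb)
      rcases hsuff with h' | h' <;> rw [h'] at hs <;>
        · have := pvLast_of_suffix_one cs _ hs
          rw [h2] at this; exact absurd (Option.some.inj this) (by decide)

theorem pvClassifyRest_ne_tup (cs : List Char) (s : List Char) :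
    (pvClassifyRest cs).1 ≠ PvCat.tup s := by
  unfold pvClassifyRest; split_ifs <;> simp

theorem pvClassify_tup_iff (cs s : List Char) :
    (pvClassify cs).1 = PvCat.tup s ↔ (pvTupGuard cs = true ∧ s = pvSuffixOf cs) := by
  rw [pvClassify_eq_ite]
  by_cases h : pvTupGuard cs = true
  · simp [h, eq_comm]
  · simp [h, pvClassifyRest_ne_tup]

theorem pvClassify_of_tup (cs : List Char) (h : pvTupGuard cs = true) :
    pvClassify cs = (PvCat.tup (pvSuffixOf cs), pvInnerOf cs) := by
  rw [pvClassify_eq_ite, if_pos h]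

theorem pvClassifyRest_eighth_iff (cs : List Char) :
    (pvClassifyRest cs).1 = PvCat.eighth ↔ pvEGuard cs = true := by
  unfold pvClassifyRest pvEGuard
  split_ifs with h1 h2 h3 <;> simp_all
  tauto

theorem pvClassifyRest_sixteenth_iff (cs : List Char) :
    (pvClassifyRest cs).1 = PvCat.sixteenth ↔ pvSGuard cs = true := by
  unfold pvClassifyRest pvSGuard
  split_ifs with h1 h2 h3 <;> simp_all
  tauto

theorem pvTupGuard_false_of_eighth (cs : List Char) (h : pvEGuard cs = true) :
    pvTupGuard cs = false := by
  cases hb : pvTupGuard cs with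
  | false => rfl
  | true =>
    have := (pvTupGuard_not_underscore cs hb).1
    unfold pvEGuard at h
    simp only [Bool.and_eq_true] at h
    rw [this] at h; simp at h

theorem pvTupGuard_false_of_sixteenth (cs : List Char) (h : pvSGuard cs = true) :
    pvTupGuard cs = false := by
  cases hb : pvTupGuard cs with
  | false => rfl
  | true =>
    have := (pvTupGuard_not_underscore cs hb).2
    unfold pvSGuard at h
    simp only [Bool.and_eq_true] at h
    rw [this] at h; simp at h

theorem pvClassify_eighth_iff (cs : List Char) :
    (pvClassify cs).1 = PvCat.eighth ↔ pvEGuard cs = true := by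
  rw [pvClassify_eq_ite]
  by_cases h : pvTupGuard cs = true
  · simp only [h, if_pos]
    constructor
    · intro hc; exact absurd hc (by simp)
    · intro he; exact absurd (pvTupGuard_false_of_eighth cs he) (by simp [h])
  · rw [if_neg h]; exact pvClassifyRest_eighth_iff cs

theorem pvClassify_sixteenth_iff (cs : List Char) :
    (pvClassify cs).1 = PvCat.sixteenth ↔ pvSGuard cs = true := by
  rw [pvClassify_eq_ite]
  by_cases h : pvTupGuard cs = true
  · simp only [h, if_pos]
    constructor
    · intro hc; exact absurd hc (by simp)
    · intro hsg; exact absurd (pvTupGuard_false_of_sixteenth cs hsg) (by simp [h])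
  · rw [if_neg h]; exact pvClassifyRest_sixteenth_iff cs

theorem pvClassify_of_eighth (cs : List Char) (h : pvEGuard cs = true) :
    pvClassify cs = (PvCat.eighth, PySem.List.slice cs none (some (-1))) := by
  rw [pvClassify_eq_ite, if_neg (by simp [pvTupGuard_false_of_eighth cs h])]
  unfold pvEGuard at h
  simp only [Bool.and_eq_true, Bool.not_eq_true', beq_eq_false_iff_ne, ne_eq] at h
  obtain ⟨⟨⟨hpipe, hend⟩, hend2⟩, htil⟩ := h
  unfold pvClassifyRest
  rw [if_neg (by simp [hpipe, htil]), if_pos (by simp [hend, hend2])]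

theorem pvClassify_of_sixteenth (cs : List Char) (h : pvSGuard cs = true) :
    pvClassify cs = (PvCat.sixteenth, PySem.List.slice cs none (some (-2))) := by
  rw [pvClassify_eq_ite, if_neg (by simp [pvTupGuard_false_of_sixteenth cs h])]
  unfold pvSGuard at h
  simp only [Bool.and_eq_true, Bool.not_eq_true', beq_eq_false_iff_ne, ne_eq] at h
  obtain ⟨⟨⟨hpipe, hend2⟩, hend3⟩, htil⟩ := h
  unfold pvClassifyRest
  rw [if_neg (by simp [hpipe, htil]), if_neg (by simp [hend2]), if_pos (by simp [hend2, hend3])]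

theorem pvClassify_none_of (cs : List Char) (h1 : pvTupGuard cs = false)
    (h2 : pvEGuard cs = false) (h3 : pvSGuard cs = false) :
    (pvClassify cs).1 = PvCat.none := by
  cases hc : (pvClassify cs).1 with
  | tup s => exact absurd ((pvClassify_tup_iff cs s).mp hc).1 (by simp [h1])
  | eighth => exact absurd ((pvClassify_eighth_iff cs).mp hc) (by simp [h2])
  | sixteenth => exact absurd ((pvClassify_sixteenth_iff cs).mp hc) (by simp [h3])
  | none => rfl

-- A's tuplet lookahead loop IS takeWhile/dropWhile on the classification key
theorem pvTupRun_eq (suff : List Char) (hs : suff = ['3'] ∨ suff = ['5']) :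
    ∀ l : List (List Char),
      pvTupRun suff l =
        ((l.takeWhile (fun x => (pvClassify x).1 == PvCat.tup suff)).map (fun x => (pvClassify x).2),
          l.dropWhile (fun x => (pvClassify x).1 == PvCat.tup suff)) := by
  intro l
  induction l with
  | nil => simp [pvTupRun]
  | cons x xs ih =>
    by_cases hp : (pvClassify x).1 = PvCat.tup suff
    · obtain ⟨hg, hsf⟩ := (pvClassify_tup_iff x suff).mp hp
      have hgc := hg
      unfold pvTupGuard at hgc
      simp only [Bool.and_eq_true] at hgc
      rw [pvTupRun, if_pos (by
          simp only [Bool.and_eq_true]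
          refine ⟨⟨hgc.1.1, hgc.1.2⟩, ⟨?_, hgc.2.1.2⟩, hgc.2.2⟩
          simp [← hsf])]
      rw [List.takeWhile_cons, List.dropWhile_cons, if_pos (by simp [hp]), if_pos (by simp [hp])]
      simp only [ih, List.map_cons, Prod.mk.injEq]
      simp [pvClassify_of_tup x hg]
    · rw [pvTupRun, if_neg (by
        intro hc
        simp only [Bool.and_eq_true, beq_iff_eq] at hc
        apply hp
        rw [pvClassify_tup_iff]
        refine ⟨?_, hc.2.1.1.symm⟩
        unfold pvTupGuard
        simp only [Bool.and_eq_true]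
        refine ⟨⟨hc.1.1, hc.1.2⟩, ⟨?_, hc.2.1.2⟩, hc.2.2⟩
        show (pvSuffixOf x == ['3'] || pvSuffixOf x == ['5']) = true
        rcases hs with h | h <;> simp [hc.2.1.1, h])]
      rw [List.takeWhile_cons, List.dropWhile_cons, if_neg (by simp [hp]), if_neg (by simp [hp])]
      simp

theorem pvERun_eq :
    ∀ l : List (List Char),
      pvERun l =
        ((l.takeWhile (fun x => (pvClassify x).1 == PvCat.eighth)).map (fun x => (pvClassify x).2),
          l.dropWhile (fun x => (pvClassify x).1 == PvCat.eighth)) := by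
  intro l
  induction l with
  | nil => simp [pvERun]
  | cons x xs ih =>
    by_cases hp : (pvClassify x).1 = PvCat.eighth
    · have he := (pvClassify_eighth_iff x).mp hp
      rw [pvERun, if_pos he]
      rw [List.takeWhile_cons, List.dropWhile_cons, if_pos (by simp [hp]), if_pos (by simp [hp])]
      simp only [ih, List.map_cons, Prod.mk.injEq]
      simp [pvClassify_of_eighth x he]
    · have he : pvEGuard x = false := by
        cases hb : pvEGuard x with
        | false => rfl
        | true => exact absurd ((pvClassify_eighth_iff x).mpr hb) hp
      rw [pvERun, if_neg (by simp [he])]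
      rw [List.takeWhile_cons, List.dropWhile_cons, if_neg (by simp [hp]), if_neg (by simp [hp])]
      simp

theorem pvSRun_eq :
    ∀ l : List (List Char),
      pvSRun l =
        ((l.takeWhile (fun x => (pvClassify x).1 == PvCat.sixteenth)).map (fun x => (pvClassify x).2),
          l.dropWhile (fun x => (pvClassify x).1 == PvCat.sixteenth)) := by
  intro l
  induction l with
  | nil => simp [pvSRun]
  | cons x xs ih =>
    by_cases hp : (pvClassify x).1 = PvCat.sixteenth
    · have he := (pvClassify_sixteenth_iff x).mp hp
      rw [pvSRun, if_pos he]
      rw [List.takeWhile_cons, List.dropWhile_cons, if_pos (by simp [hp]), if_pos (by simp [hp])]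
      simp only [ih, List.map_cons, Prod.mk.injEq]
      simp [pvClassify_of_sixteenth x he]
    · have he : pvSGuard x = false := by
        cases hb : pvSGuard x with
        | false => rfl
        | true => exact absurd ((pvClassify_sixteenth_iff x).mpr hb) hp
      rw [pvSRun, if_neg (by simp [he])]
      rw [List.takeWhile_cons, List.dropWhile_cons, if_neg (by simp [hp]), if_neg (by simp [hp])]
      simp

-- a 'none' token passes through B's groupby untouched
theorem pvMergeB_cons_none (t : List Char) (rest : List (List Char))
    (hn : (pvClassify t).1 = PvCat.none) :
    pvMergeB (t :: rest) = t :: pvMergeB rest := by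
  rw [pvMergeB]
  simp only [hn]
  cases rest with
  | nil => simp [pvEmit, pvMergeB]
  | cons x xs =>
    by_cases hx : (pvClassify x).1 = PvCat.none
    · rw [List.takeWhile_cons, List.dropWhile_cons, if_pos (by simp [hx]), if_pos (by simp [hx])]
      rw [pvMergeB]
      simp only [hx]
      simp [pvEmit]
    · rw [List.takeWhile_cons, List.dropWhile_cons, if_neg (by simp [hx]), if_neg (by simp [hx])]
      simp [pvEmit]

theorem pvMergeA_eq_pvMergeB_aux :
    ∀ (n : Nat) (l : List (List Char)), l.length ≤ n → pvMergeA l = pvMergeB l := by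
  intro n
  induction n with
  | zero =>
    intro l hl
    have : l = [] := List.length_eq_zero_iff.mp (Nat.le_zero.mp hl)
    subst this; rw [pvMergeA, pvMergeB]
  | succ n ih =>
    intro l hl
    cases l with
    | nil => rw [pvMergeA, pvMergeB]
    | cons t rest =>
      have hr : rest.length ≤ n := by simpa using hl
      rw [pvMergeA, pvMergeB]
      by_cases htup : pvTupGuard t = true
      · rw [if_pos htup]
        have hs := pvTupGuard_suffix35 t htup
        have hct := pvClassify_of_tup t htup
        rw [pvTupRun_eq (pvSuffixOf t) hs rest]
        simp only [hct]
        simp only [pvEmit, List.map_cons, hct]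
        rw [ih _ ((List.length_dropWhile_le _ _).trans hr)]
        rfl
      · rw [if_neg htup]
        by_cases he : pvEGuard t = true
        · rw [if_pos he]
          have hct := pvClassify_of_eighth t he
          rw [pvERun_eq rest]
          simp only [hct]
          cases hrw : rest.takeWhile (fun x => (pvClassify x).1 == PvCat.eighth) with
          | nil =>
            have hdw : rest.dropWhile (fun x => (pvClassify x).1 == PvCat.eighth) = rest := by
              cases rest with
              | nil => rfl
              | cons y ys =>
                rw [List.takeWhile_cons] at hrw
                rw [List.dropWhile_cons]
                split at hrw
                · exact absurd hrw (by simp)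
                · rw [if_neg (by assumption)]
            rw [hdw]
            rw [if_neg (by simp)]
            simp only [pvEmit, List.length_cons, List.length_nil]
            rw [if_neg (by omega)]
            rw [ih _ hr]
            rfl
          | cons y ys =>
            rw [if_pos (by simp only [List.length_cons, List.length_map]; omega)]
            simp only [pvEmit, List.length_cons, List.map_cons]
            rw [if_pos (by omega)]
            rw [ih _ ((List.length_dropWhile_le _ _).trans hr)]
            simp only [hct]
            rfl
        · rw [if_neg he]
          by_cases hsg : pvSGuard t = true
          · rw [if_pos hsg]
            have hct := pvClassify_of_sixteenth t hsg
            rw [pvSRun_eq rest]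
            simp only [hct]
            cases hrw : rest.takeWhile (fun x => (pvClassify x).1 == PvCat.sixteenth) with
            | nil =>
              have hdw : rest.dropWhile (fun x => (pvClassify x).1 == PvCat.sixteenth) = rest := by
                cases rest with
                | nil => rfl
                | cons y ys =>
                  rw [List.takeWhile_cons] at hrw
                  rw [List.dropWhile_cons]
                  split at hrw
                  · exact absurd hrw (by simp)
                  · rw [if_neg (by assumption)]
              rw [hdw]
              rw [if_neg (by simp)]
              simp only [pvEmit, List.length_cons, List.length_nil]
              rw [if_neg (by omega)]
              rw [ih _ hr]
              rfl
            | cons y ys =>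
              rw [if_pos (by simp only [List.length_cons, List.length_map]; omega)]
              simp only [pvEmit, List.length_cons, List.map_cons]
              rw [if_pos (by omega)]
              rw [ih _ ((List.length_dropWhile_le _ _).trans hr)]
              simp only [hct]
              rfl
          · rw [if_neg hsg]
            have hn := pvClassify_none_of t (by simpa using htup) (by simpa using he)
              (by simpa using hsg)
            rw [← pvMergeB, pvMergeB_cons_none t rest hn, ih _ hr]

theorem pvMergeA_eq_pvMergeB (l : List (List Char)) : pvMergeA l = pvMergeB l :=
  pvMergeA_eq_pvMergeB_aux l.length l (Nat.le_refl _)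

-- ===== VERDICT (by name: the statement is the Claim_ definition above) =====
theorem merge_consecutive_tuplets_py_spec : Claim_equal_merge_consecutive_tuplets_py := by
  intro tokens _
  unfold Spec_merge_consecutive_tuplets_py merge_consecutive_tuplets_py merge_consecutive_tuplets_py_alt
  rw [pvMergeA_eq_pvMergeB]
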